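-- pv_equiv track=rewrite | github.com/harrytflv/foobar | level5/expanding-nebula/solution.py | solution
-- ===== SOURCE A (Python) =====
-- from collections import defaultdict
--
-- def transfer(col_1, col_2, height):
--     col_1_no_tail = col_1 >> 1
--     col_2_no_tail = col_2 >> 1
--     col_1_no_head = col_1 & ~(1<<height)
--     col_2_no_head = col_2 & ~(1<<height)
--
--     # All four cases of one:
--     # 1 0
--     # 0 0
--     tl =  col_1_no_tail & ~col_2_no_tail & ~col_1_no_head & ~col_2_no_head
--     # 0 1
--     # 0 0
--     tr = ~col_1_no_tail &  col_2_no_tail & ~col_1_no_head & ~col_2_no_head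
--     # 0 0
--     # 1 0
--     bl = ~col_1_no_tail & ~col_2_no_tail &  col_1_no_head & ~col_2_no_head
--     # 0 0
--     # 0 1
--     br = ~col_1_no_tail & ~col_2_no_tail & ~col_1_no_head &  col_2_no_head
--     return tl | tr | bl | br
--
-- def solution(g):
--     if len(g) == 0:
--         return 0
--
--     height, width = len(g), len(g[0])
--     cols = [sum([1<<i if g[i][j] else 0 for i in range(height)]) for j in range(width)]
--
--     # A mapping from (col_1, col_2) to a set containing col_3 means:
--     #   col_1 = transfer(col_2, col_3)
--     # The value of mapping[(col_a, col_b)] is all columns i such that: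
--     #   col_a = transfer(col_b, col_i)
--     mapping = defaultdict(set)
--     cols_set = set(cols)
--     for col_pattern_a in range(1<<(height+1)):
--         for col_pattern_b in range(1<<(height+1)):
--             res = transfer(col_pattern_a, col_pattern_b, height)
--             if res in cols_set:
--                 mapping[(res, col_pattern_a)].add(col_pattern_b)
--
--     pre_state_col_num = {i: 1 for i in range(1<<(height+1))}
--     for col in cols:
--         pre_state_next_col_num = defaultdict(int)
--         for col_1 in pre_state_col_num:
--             for col_2 in mapping[(col, col_1)]:
--                 pre_state_next_col_num[col_2] += pre_state_col_num[col_1]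
--         pre_state_col_num = pre_state_next_col_num
--
--     return sum(pre_state_col_num.values())
-- ===== SOURCE B (Python) =====
-- def transfer(col_1, col_2, height):
--     col_1_no_tail = col_1 >> 1
--     col_2_no_tail = col_2 >> 1
--     col_1_no_head = col_1 & ~(1 << height)
--     col_2_no_head = col_2 & ~(1 << height)
--     tl =  col_1_no_tail & ~col_2_no_tail & ~col_1_no_head & ~col_2_no_head
--     tr = ~col_1_no_tail &  col_2_no_tail & ~col_1_no_head & ~col_2_no_head
--     bl = ~col_1_no_tail & ~col_2_no_tail &  col_1_no_head & ~col_2_no_head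
--     br = ~col_1_no_tail & ~col_2_no_tail & ~col_1_no_head &  col_2_no_head
--     return tl | tr | bl | br
--
-- def solution(g):
--     if len(g) == 0:
--         return 0
--     height, width = len(g), len(g[0])
--     cols = [sum([1 << i if g[i][j] else 0 for i in range(height)]) for j in range(width)]
--     n = 1 << (height + 1)
--     # Array DP over all 2^(height+1) preimage columns; transitions are tested
--     # inline with transfer instead of being precomputed into a global mapping.
--     state = [1] * n
--     for col in cols:
--         state = [sum(state[c1] if transfer(c1, c2, height) == col else 0
--                      for c1 in range(n))
--                  for c2 in range(n)]
--     return sum(state)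
-- ===== Notes on version B (the rewrite author's own statement) =====
-- stated objective: simpler
-- what changed: B drops A's precomputed (column,column)->successor-set mapping and its dict-of-counts DP entirely, and instead runs an array DP indexed by all 2^(height+1) preimage columns, testing each transition inline with transfer during the sweep.
import Mathlib
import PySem

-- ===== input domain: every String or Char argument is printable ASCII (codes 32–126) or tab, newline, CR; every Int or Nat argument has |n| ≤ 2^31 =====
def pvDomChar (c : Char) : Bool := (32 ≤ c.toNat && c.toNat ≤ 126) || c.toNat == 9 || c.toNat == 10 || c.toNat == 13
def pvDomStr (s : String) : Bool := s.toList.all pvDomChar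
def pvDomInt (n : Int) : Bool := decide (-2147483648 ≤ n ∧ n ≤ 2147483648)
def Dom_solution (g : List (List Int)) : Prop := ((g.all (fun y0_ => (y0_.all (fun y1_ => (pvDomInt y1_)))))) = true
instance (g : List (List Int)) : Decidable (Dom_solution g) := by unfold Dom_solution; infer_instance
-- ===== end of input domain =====

-- B replaces A's precomputed (column, column) → successor-set mapping and dict-based DP
-- by a plain array DP over all 2^(height+1) preimage columns with transitions tested
-- inline; objective: simpler (no speed claim).

-- ===== PORT A =====
-- helper `transfer` (defined identically in both Python sources, ported once)
def transfer (col1 col2 : Int) (height : Nat) : Int :=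
  let col1NoTail := col1 >>> (1:Nat)
  let col2NoTail := col2 >>> (1:Nat)
  let col1NoHead := PySem.Int.band col1 (Int.not ((1:Int) <<< height))
  let col2NoHead := PySem.Int.band col2 (Int.not ((1:Int) <<< height))
  let tl := PySem.Int.band (PySem.Int.band (PySem.Int.band col1NoTail (Int.not col2NoTail)) (Int.not col1NoHead)) (Int.not col2NoHead)
  let tr := PySem.Int.band (PySem.Int.band (PySem.Int.band (Int.not col1NoTail) col2NoTail) (Int.not col1NoHead)) (Int.not col2NoHead)
  let bl := PySem.Int.band (PySem.Int.band (PySem.Int.band (Int.not col1NoTail) (Int.not col2NoTail)) col1NoHead) (Int.not col2NoHead)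
  let br := PySem.Int.band (PySem.Int.band (PySem.Int.band (Int.not col1NoTail) (Int.not col2NoTail)) (Int.not col1NoHead)) col2NoHead
  PySem.Int.bor (PySem.Int.bor (PySem.Int.bor tl tr) bl) br

def solution (g : List (List Int)) : Int :=
  if g.length == 0 then 0 else
    let height := g.length
    let width := (PySem.List.pyGetD g 0 []).length
    let cols : List Int := (PySem.List.pyRange 0 (width:Int) 1).map (fun j =>
      ((PySem.List.pyRange 0 (height:Int) 1).map (fun i =>
        if PySem.List.pyGetD (PySem.List.pyGetD g i []) j 0 ≠ 0 then (1:Int) <<< i.toNat else 0)).sum)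
    let colsSet : PySem.Set Int := PySem.Set.ofList cols
    let mapping : PySem.Dict (Int × Int) (PySem.Set Int) :=
      (PySem.List.pyRange 0 ((1:Int) <<< (height+1)) 1).foldl (fun m colPatternA =>
        (PySem.List.pyRange 0 ((1:Int) <<< (height+1)) 1).foldl (fun m colPatternB =>
          let res := transfer colPatternA colPatternB height
          if PySem.Set.contains colsSet res then
            m.modify (res, colPatternA) PySem.Set.empty (fun s => PySem.Set.add s colPatternB)
          else m) m) PySem.Dict.empty
    let preState0 : PySem.Dict Int Int :=
      (PySem.List.pyRange 0 ((1:Int) <<< (height+1)) 1).foldl (fun d i => d.insert i 1) PySem.Dict.empty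
    let finState := cols.foldl (fun st col =>
      st.keys.foldl (fun nxt c1 =>
        (mapping.getD (col, c1) PySem.Set.empty).foldl (fun nxt c2 =>
          nxt.modify c2 0 (fun x => x + st.getD c1 0)) nxt) PySem.Dict.empty) preState0
    finState.values.sum

-- ===== PORT B =====
def solution_alt (g : List (List Int)) : Int :=
  match g with
  | [] => 0
  | g0 :: _ =>
    let height := g.length
    let width := g0.length
    let cols : List Int := (PySem.List.pyRange 0 (width:Int) 1).map (fun j =>
      ((PySem.List.pyRange 0 (height:Int) 1).map (fun i =>
        if PySem.List.pyGetD (PySem.List.pyGetD g i []) j 0 ≠ 0 then (1:Int) <<< i.toNat else 0)).sum)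
    let n : Nat := 1 <<< (height+1)
    let finState := cols.foldl (fun state col =>
      (List.range n).map (fun (c2 : Nat) =>
        ((List.range n).map (fun (c1 : Nat) =>
          if transfer (c1:Int) (c2:Int) height = col then state.getD c1 0 else 0)).sum))
      (List.replicate n 1)
    finState.sum

-- ===== PRECONDITION & SPEC =====
-- Pre_ excludes only ragged grids whose first row is longer than some later row,
-- on which A raises IndexError (g[i][j]); it admits every rectangular grid.
def Pre_solution (g : List (List Int)) : Prop :=
  ∀ row ∈ g, (g.headD []).length ≤ row.length
instance (g : List (List Int)) : Decidable (Pre_solution g) := by unfold Pre_solution; infer_instance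
def pvWitness_solution : List (List Int) := [[1, 0], [0, 0]]

def Spec_solution (g : List (List Int)) (out : Int) : Prop := out = solution_alt g
instance (g : List (List Int)) (out : Int) : Decidable (Spec_solution g out) := by unfold Spec_solution; infer_instance

-- ===== CLAIM (what is proved, stated in full; the proofs are below) =====
def Claim_equal_solution : Prop := ∀ (g : List (List Int)), Dom_solution g → Pre_solution g → Spec_solution g (solution g)

-- ===== LEMMAS AND PROOFS =====

-- proof-side abbreviations
def pvN (h : Nat) : Int := (1:Int) <<< (h+1)
def pvRng (h : Nat) : List Int := PySem.List.pyRange 0 (pvN h) 1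
def pvS (h : Nat) (col a : Int) : List Int := (pvRng h).filter (fun b => transfer a b h == col)
def pvStepF (h : Nat) (col : Int) (f : Int → Int) : Int → Int :=
  fun c2 => ((pvRng h).map (fun c1 => if transfer c1 c2 h = col then f c1 else 0)).sum
def pvIter (h : Nat) (cs : List Int) (f : Int → Int) : Int → Int :=
  cs.foldl (fun f col => pvStepF h col f) f

-- the two loop bodies of A, named so the lemmas below can speak about them
def pvMStep (h : Nat) (cs : PySem.Set Int) (a : Int)
    (m : PySem.Dict (Int × Int) (PySem.Set Int)) (b : Int) :
    PySem.Dict (Int × Int) (PySem.Set Int) :=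
  let res := transfer a b h
  if PySem.Set.contains cs res then
    m.modify (res, a) PySem.Set.empty (fun s => PySem.Set.add s b)
  else m

def pvADP (mp : PySem.Dict (Int × Int) (PySem.Set Int)) (st : PySem.Dict Int Int)
    (col : Int) : PySem.Dict Int Int :=
  st.keys.foldl (fun nxt c1 =>
    (mp.getD (col, c1) PySem.Set.empty).foldl (fun nxt c2 =>
      nxt.modify c2 0 (fun x => x + st.getD c1 0)) nxt) PySem.Dict.empty

lemma pvRng_eq (h : Nat) : pvRng h = (List.range (1 <<< (h+1))).map (fun (k : Nat) => (k:Int)) := by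
  have e : ((1:Int) <<< (h+1)) = ((1 <<< (h+1) : Nat) : Int) := by
    simp [Int.shiftLeft_eq, Nat.shiftLeft_eq]
  unfold pvRng pvN
  rw [e, PySem.List.pyRange_one]
  simp only [Int.sub_zero, Int.toNat_natCast, zero_add]

lemma pvRng_nodup (h : Nat) : (pvRng h).Nodup := PySem.List.nodup_pyRange_one 0 (pvN h)

lemma mem_pvS (h : Nat) (col a c : Int) :
    c ∈ pvS h col a ↔ c ∈ pvRng h ∧ transfer a c h = col := by
  simp [pvS]

lemma pvS_nodup (h : Nat) (col a : Int) : (pvS h col a).Nodup :=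
  (pvRng_nodup h).filter _

-- mapping characterization
lemma pvML1a (h : Nat) (cs : PySem.Set Int) (bs : List Int)
    (m : PySem.Dict (Int × Int) (PySem.Set Int)) (a col : Int) :
    ((bs.foldl (pvMStep h cs a) m).getD (col, a) PySem.Set.empty)
    = if PySem.Set.contains cs col = true then
        PySem.Set.update (m.getD (col, a) PySem.Set.empty)
          (bs.filter (fun b => transfer a b h == col))
      else m.getD (col, a) PySem.Set.empty := by
  induction bs generalizing m with
  | nil =>
    by_cases hcc : PySem.Set.contains cs col = true
    · rw [if_pos hcc]; rfl
    · rw [if_neg hcc]; rfl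
  | cons b bs ih =>
    simp only [List.foldl_cons]
    rw [ih]
    by_cases hres : PySem.Set.contains cs (transfer a b h) = true
    · by_cases hbc : (transfer a b h == col) = true
      · have hcol : transfer a b h = col := eq_of_beq hbc
        have hcc : PySem.Set.contains cs col = true := hcol ▸ hres
        rw [if_pos hcc, if_pos hcc]
        have hstep : pvMStep h cs a m b
            = m.modify (col, a) PySem.Set.empty (fun s => PySem.Set.add s b) := by
          show (if PySem.Set.contains cs (transfer a b h) = true then
              m.modify (transfer a b h, a) PySem.Set.empty (fun s => PySem.Set.add s b)
            else m) = _
          rw [if_pos hres, hcol]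
        rw [hstep, PySem.Dict.getD_modify_self, List.filter_cons, if_pos hbc]
        rfl
      · have hcol : transfer a b h ≠ col := fun e => hbc (by simp [e])
        have hstep : (pvMStep h cs a m b).getD (col, a) PySem.Set.empty
            = m.getD (col, a) PySem.Set.empty := by
          show (if PySem.Set.contains cs (transfer a b h) = true then
              m.modify (transfer a b h, a) PySem.Set.empty (fun s => PySem.Set.add s b)
            else m).getD (col, a) PySem.Set.empty = _
          rw [if_pos hres]
          exact PySem.Dict.getD_modify_of_ne _ _ _
            (by simp only [ne_eq, Prod.mk.injEq, not_and]; exact fun e _ => hcol e.symm)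
        rw [hstep, List.filter_cons, if_neg hbc]
    · have hstep : pvMStep h cs a m b = m := by
        show (if PySem.Set.contains cs (transfer a b h) = true then
            m.modify (transfer a b h, a) PySem.Set.empty (fun s => PySem.Set.add s b)
          else m) = m
        rw [if_neg hres]
      rw [hstep]
      by_cases hcc : PySem.Set.contains cs col = true
      · have hbc : (transfer a b h == col) = false := by
          rw [beq_eq_false_iff_ne]
          intro e
          exact hres (e ▸ hcc)
        rw [if_pos hcc, if_pos hcc, List.filter_cons, if_neg (by simp [hbc])]
      · rw [if_neg hcc, if_neg hcc]

lemma pvML1b (h : Nat) (cs : PySem.Set Int) (bs : List Int)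
    (m : PySem.Dict (Int × Int) (PySem.Set Int)) (a a' col : Int) (hne : a' ≠ a) :
    ((bs.foldl (pvMStep h cs a) m).getD (col, a') PySem.Set.empty)
    = m.getD (col, a') PySem.Set.empty := by
  induction bs generalizing m with
  | nil => rfl
  | cons b bs ih =>
    simp only [List.foldl_cons]
    rw [ih]
    by_cases hres : PySem.Set.contains cs (transfer a b h) = true
    · have hstep : pvMStep h cs a m b
          = m.modify (transfer a b h, a) PySem.Set.empty (fun s => PySem.Set.add s b) := by
        show (if PySem.Set.contains cs (transfer a b h) = true then
            m.modify (transfer a b h, a) PySem.Set.empty (fun s => PySem.Set.add s b)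
          else m) = _
        rw [if_pos hres]
      rw [hstep]
      exact PySem.Dict.getD_modify_of_ne _ _ _ (by simp [hne])
    · have hstep : pvMStep h cs a m b = m := by
        show (if PySem.Set.contains cs (transfer a b h) = true then
            m.modify (transfer a b h, a) PySem.Set.empty (fun s => PySem.Set.add s b)
          else m) = m
        rw [if_neg hres]
      rw [hstep]

lemma pvML2b (h : Nat) (cs : PySem.Set Int) (bs as : List Int)
    (m : PySem.Dict (Int × Int) (PySem.Set Int)) (a col : Int) (ha : a ∉ as) :
    ((as.foldl (fun m a' => bs.foldl (pvMStep h cs a') m) m).getD (col, a) PySem.Set.empty)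
    = m.getD (col, a) PySem.Set.empty := by
  induction as generalizing m with
  | nil => rfl
  | cons a' as ih =>
    simp only [List.foldl_cons]
    rw [ih _ (fun hmem => ha (List.mem_cons_of_mem _ hmem)),
      pvML1b h cs bs m a' a col (fun e => ha (e ▸ List.mem_cons_self))]

lemma pvML2 (h : Nat) (cs : PySem.Set Int) (bs as : List Int)
    (m : PySem.Dict (Int × Int) (PySem.Set Int)) (a col : Int)
    (hnd : as.Nodup) (ha : a ∈ as) :
    ((as.foldl (fun m a' => bs.foldl (pvMStep h cs a') m) m).getD (col, a) PySem.Set.empty)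
    = if PySem.Set.contains cs col = true then
        PySem.Set.update (m.getD (col, a) PySem.Set.empty)
          (bs.filter (fun b => transfer a b h == col))
      else m.getD (col, a) PySem.Set.empty := by
  induction as generalizing m with
  | nil => cases ha
  | cons a' as ih =>
    simp only [List.foldl_cons]
    rcases List.mem_cons.mp ha with rfl | hmem
    · rw [pvML2b h cs bs as _ a col (List.nodup_cons.mp hnd).1, pvML1a]
    · rw [ih _ (List.nodup_cons.mp hnd).2 hmem,
        pvML1b h cs bs m a' a col (fun e => (List.nodup_cons.mp hnd).1 (e ▸ hmem))]

lemma pvMapping (h : Nat) (cs : PySem.Set Int) (a col : Int)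
    (ha : a ∈ pvRng h) (hc : PySem.Set.contains cs col = true) :
    (((pvRng h).foldl (fun m a' => (pvRng h).foldl (pvMStep h cs a') m)
        PySem.Dict.empty).getD (col, a) PySem.Set.empty)
    = pvS h col a := by
  rw [pvML2 h cs (pvRng h) (pvRng h) PySem.Dict.empty a col (pvRng_nodup h) ha, if_pos hc]
  have he : (PySem.Dict.empty : PySem.Dict (Int × Int) (PySem.Set Int)).getD (col, a)
      PySem.Set.empty = PySem.Set.empty := by simp
  rw [he]
  show PySem.Set.ofList ((pvRng h).filter (fun b => transfer a b h == col)) = _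
  rw [PySem.Set.ofList_eq_self_of_nodup _ ((pvRng_nodup h).filter _)]
  rfl

-- dict DP characterization
lemma pvG2 (l : List Int) (d : PySem.Dict Int Int) (c v : Int) :
    ((l.foldl (fun d c2 => d.modify c2 0 (fun x => x + v)) d).getD c 0)
    = d.getD c 0 + v * (l.count c : Int) := by
  induction l generalizing d with
  | nil => simp
  | cons b l ih =>
    simp only [List.foldl_cons]
    rw [ih, PySem.Dict.getD_modify]
    by_cases hc : c = b
    · subst hc
      simp only [List.count_cons, beq_self_eq_true]
      push_cast
      ring
    · rw [if_neg hc]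
      have : (b == c) = false := by simp [Ne.symm hc]
      simp only [List.count_cons, this]
      push_cast
      ring

lemma pvDPL (ks : List Int) (M : Int → List Int) (v : Int → Int)
    (nxt : PySem.Dict Int Int) (c : Int) :
    ((ks.foldl (fun nxt c1 =>
        (M c1).foldl (fun nxt c2 => nxt.modify c2 0 (fun x => x + v c1)) nxt) nxt).getD c 0)
    = nxt.getD c 0 + (ks.map (fun c1 => v c1 * ((M c1).count c : Int))).sum := by
  induction ks generalizing nxt with
  | nil => simp
  | cons k ks ih =>
    simp only [List.foldl_cons, List.map_cons, List.sum_cons]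
    rw [ih, pvG2]
    ring

lemma pvDPK (ks : List Int) (M : Int → List Int) (v : Int → Int)
    (nxt : PySem.Dict Int Int) (c : Int)
    (hc : c ∈ (ks.foldl (fun nxt c1 =>
        (M c1).foldl (fun nxt c2 => nxt.modify c2 0 (fun x => x + v c1)) nxt) nxt).keys) :
    c ∈ nxt.keys ∨ ∃ c1 ∈ ks, c ∈ M c1 := by
  revert hc
  induction ks generalizing nxt with
  | nil => exact fun hc => Or.inl hc
  | cons k ks ih =>
    intro hc
    simp only [List.foldl_cons] at hc
    rcases ih _ hc with hmem | ⟨c1, hc1, hm⟩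
    · rw [show (fun (nxt : PySem.Dict Int Int) (c2 : Int) => nxt.modify c2 0 (fun x => x + v k))
            = (fun d x => d.modify x 0 ((fun _ _ => (fun y => y + v k)) d x)) from rfl,
        PySem.Dict.keys_foldl_modify] at hmem
      rcases (PySem.Set.mem_update _ _ _).mp hmem with h1 | h2
      · exact Or.inl h1
      · exact Or.inr ⟨k, List.mem_cons_self, h2⟩
    · exact Or.inr ⟨c1, List.mem_cons_of_mem _ hc1, hm⟩

lemma pvDPnodup (ks : List Int) (M : Int → List Int) (v : Int → Int)
    (nxt : PySem.Dict Int Int) (hnd : nxt.keys.Nodup) :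
    ((ks.foldl (fun nxt c1 =>
        (M c1).foldl (fun nxt c2 => nxt.modify c2 0 (fun x => x + v c1)) nxt) nxt).keys).Nodup := by
  induction ks generalizing nxt with
  | nil => exact hnd
  | cons k ks ih =>
    simp only [List.foldl_cons]
    exact ih _ (PySem.Dict.nodup_keys_foldl_modify_key (M k) id 0
      (fun _ _ => (fun y => y + v k)) nxt hnd)

-- sum extension from the key list to the whole range
lemma pvSumExt (ks rs : List Int) (q : Int → Int) (hk : ks.Nodup) (hr : rs.Nodup)
    (hsub : ∀ k ∈ ks, k ∈ rs) (hz : ∀ c ∈ rs, c ∉ ks → q c = 0) :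
    (ks.map q).sum = (rs.map q).sum := by
  rw [← List.sum_toFinset q hk, ← List.sum_toFinset q hr]
  exact Finset.sum_subset (fun x hx => List.mem_toFinset.mpr (hsub x (List.mem_toFinset.mp hx)))
    (fun x hx hnx => hz x (List.mem_toFinset.mp hx) (fun hin => hnx (List.mem_toFinset.mpr hin)))

-- initial dict
lemma pvInit (h : Nat) :
    (((pvRng h).foldl (fun d i => d.insert i 1) PySem.Dict.empty : PySem.Dict Int Int).items)
    = (pvRng h).map (fun i => (i, (1:Int))) := by
  rw [show (fun (d : PySem.Dict Int Int) (i : Int) => d.insert i 1)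
        = (fun d a => d.insert (id a) ((fun (_ : Int) => (1:Int)) a)) from rfl,
    PySem.Dict.items_foldl_insert_fresh _ id _ _ (fun a _ => by simp)
      (by simpa using pvRng_nodup h)]
  show (PySem.Dict.empty (κ := Int) (ν := Int)).items ++ _ = _
  rw [show (PySem.Dict.empty (κ := Int) (ν := Int)).items = [] from rfl]
  simp

lemma pvInit_keys (h : Nat) :
    (((pvRng h).foldl (fun d i => d.insert i 1) PySem.Dict.empty : PySem.Dict Int Int).keys)
    = pvRng h := by
  rw [show (fun (d : PySem.Dict Int Int) (i : Int) => d.insert i 1)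
        = (fun d x => d.insert x ((fun (_ : PySem.Dict Int Int) (_ : Int) => (1:Int)) d x)) from rfl,
    PySem.Dict.keys_foldl_insert]
  have : PySem.Set.update (PySem.Dict.empty (κ := Int) (ν := Int)).keys (pvRng h)
      = PySem.Set.ofList (pvRng h) := rfl
  rw [this, PySem.Set.ofList_eq_self_of_nodup _ (pvRng_nodup h)]

lemma pvInit_getD (h : Nat) (c : Int) :
    (((pvRng h).foldl (fun d i => d.insert i 1) PySem.Dict.empty : PySem.Dict Int Int).getD c 0)
    = if c ∈ pvRng h then 1 else 0 := by
  by_cases hc : c ∈ pvRng h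
  · rw [if_pos hc]
    have hnd : (((pvRng h).foldl (fun d i => d.insert i 1) PySem.Dict.empty :
        PySem.Dict Int Int)).keys.Nodup := by
      rw [pvInit_keys]; exact pvRng_nodup h
    exact PySem.Dict.getD_of_mem_items _
      (by rw [pvInit]; exact List.mem_map.mpr ⟨c, hc, rfl⟩) hnd 0
  · rw [if_neg hc]
    refine PySem.Dict.getD_of_not_contains _ _ ?_
    rw [Bool.eq_false_iff]
    intro hcon
    exact hc (by rw [← pvInit_keys h]; exact (PySem.Dict.contains_iff_mem_keys _ _).mp hcon)

-- the A-side DP fold keeps the invariant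
lemma pvADP_inv (h : Nat) (mp : PySem.Dict (Int × Int) (PySem.Set Int)) (col : Int)
    (st : PySem.Dict Int Int) (f : Int → Int)
    (hmp : ∀ a ∈ pvRng h, mp.getD (col, a) PySem.Set.empty = pvS h col a)
    (hnd : st.keys.Nodup) (hsub : ∀ k ∈ st.keys, k ∈ pvRng h)
    (hval : ∀ c, st.getD c 0 = if c ∈ pvRng h then f c else 0) :
    (pvADP mp st col).keys.Nodup ∧ (∀ k ∈ (pvADP mp st col).keys, k ∈ pvRng h) ∧
      (∀ c, (pvADP mp st col).getD c 0 = if c ∈ pvRng h then pvStepF h col f c else 0) := by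
  refine ⟨?_, ?_, ?_⟩
  · exact pvDPnodup st.keys (fun c1 => mp.getD (col, c1) PySem.Set.empty)
      (fun c1 => st.getD c1 0) PySem.Dict.empty (by simp)
  · intro k hk
    rcases pvDPK st.keys (fun c1 => mp.getD (col, c1) PySem.Set.empty)
        (fun c1 => st.getD c1 0) PySem.Dict.empty k hk with hmem | ⟨c1, hc1, hm⟩
    · simp at hmem
    · rw [hmp c1 (hsub c1 hc1)] at hm
      exact ((mem_pvS h col c1 k).mp hm).1
  · intro c
    have hd := pvDPL st.keys (fun c1 => mp.getD (col, c1) PySem.Set.empty)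
      (fun c1 => st.getD c1 0) PySem.Dict.empty c
    rw [show pvADP mp st col = st.keys.foldl (fun nxt c1 =>
        (mp.getD (col, c1) PySem.Set.empty).foldl (fun nxt c2 =>
          nxt.modify c2 0 (fun x => x + st.getD c1 0)) nxt) PySem.Dict.empty from rfl,
      hd]
    simp only [PySem.Dict.getD_empty, zero_add]
    by_cases hc : c ∈ pvRng h
    · rw [if_pos hc]
      have hcong : ∀ c1 ∈ st.keys,
          st.getD c1 0 * (((mp.getD (col, c1) PySem.Set.empty).count c : Nat) : Int)
          = (if transfer c1 c h = col then f c1 else 0) := by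
        intro c1 hc1
        rw [hmp c1 (hsub c1 hc1)]
        by_cases ht : transfer c1 c h = col
        · rw [if_pos ht, List.count_eq_one_of_mem (pvS_nodup h col c1)
            ((mem_pvS h col c1 c).mpr ⟨hc, ht⟩)]
          have := hval c1
          rw [if_pos (hsub c1 hc1)] at this
          rw [this]
          ring
        · rw [if_neg ht, List.count_eq_zero.mpr (fun hmem =>
            ht ((mem_pvS h col c1 c).mp hmem).2)]
          ring
      rw [List.map_congr_left hcong]
      rw [pvSumExt st.keys (pvRng h) (fun c1 => if transfer c1 c h = col then f c1 else 0)
        hnd (pvRng_nodup h) hsub ?_]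
      · rfl
      · intro c1 hc1 hnk
        have h0 : st.getD c1 0 = 0 :=
          PySem.Dict.getD_of_not_contains _ _ (by
            rw [Bool.eq_false_iff]
            intro hcon
            exact hnk ((PySem.Dict.contains_iff_mem_keys _ _).mp hcon))
        have := hval c1
        rw [if_pos hc1, h0] at this
        show (if transfer c1 c h = col then f c1 else 0) = 0
        rw [← this]
        split <;> rfl
    · rw [if_neg hc]
      apply List.sum_eq_zero
      intro x hx
      rcases List.mem_map.mp hx with ⟨c1, hc1, rfl⟩
      rw [hmp c1 (hsub c1 hc1), List.count_eq_zero.mpr (fun hmem =>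
        hc ((mem_pvS h col c1 c).mp hmem).1)]
      ring

lemma pvAFold (h : Nat) (mp : PySem.Dict (Int × Int) (PySem.Set Int)) (cs : List Int)
    (st : PySem.Dict Int Int) (f : Int → Int)
    (hmp : ∀ col ∈ cs, ∀ a ∈ pvRng h, mp.getD (col, a) PySem.Set.empty = pvS h col a)
    (hnd : st.keys.Nodup) (hsub : ∀ k ∈ st.keys, k ∈ pvRng h)
    (hval : ∀ c, st.getD c 0 = if c ∈ pvRng h then f c else 0) :
    (cs.foldl (pvADP mp) st).keys.Nodup ∧
      (∀ k ∈ (cs.foldl (pvADP mp) st).keys, k ∈ pvRng h) ∧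
      (∀ c, (cs.foldl (pvADP mp) st).getD c 0
        = if c ∈ pvRng h then pvIter h cs f c else 0) := by
  induction cs generalizing st f with
  | nil => exact ⟨hnd, hsub, hval⟩
  | cons col cs ih =>
    obtain ⟨h1, h2, h3⟩ := pvADP_inv h mp col st f
      (hmp col List.mem_cons_self) hnd hsub hval
    simpa only [List.foldl_cons] using
      ih (pvADP mp st col) (pvStepF h col f)
        (fun col' hcol' => hmp col' (List.mem_cons_of_mem _ hcol')) h1 h2 h3

-- the B-side array fold computes the same iterate
lemma pvBFold (h : Nat) (cs : List Int) (f : Int → Int) :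
    cs.foldl (fun (state : List Int) (col : Int) =>
      (List.range (1 <<< (h+1))).map (fun (c2 : Nat) =>
        ((List.range (1 <<< (h+1))).map (fun (c1 : Nat) =>
          if transfer (c1:Int) (c2:Int) h = col then state.getD c1 0 else 0)).sum))
      ((List.range (1 <<< (h+1))).map (fun (k : Nat) => f (k:Int)))
    = (List.range (1 <<< (h+1))).map (fun (k : Nat) => pvIter h cs f (k:Int)) := by
  induction cs generalizing f with
  | nil => rfl
  | cons col cs ih =>
    simp only [List.foldl_cons]
    have hstep : (List.range (1 <<< (h+1))).map (fun (c2 : Nat) =>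
        ((List.range (1 <<< (h+1))).map (fun (c1 : Nat) =>
          if transfer (c1:Int) (c2:Int) h = col then
            (((List.range (1 <<< (h+1))).map (fun (k : Nat) => f (k:Int))).getD c1 0)
          else 0)).sum)
        = (List.range (1 <<< (h+1))).map (fun (k : Nat) => pvStepF h col f (k:Int)) := by
      apply List.map_congr_left
      intro c2 _
      have hinner : ∀ c1 ∈ List.range (1 <<< (h+1)),
          (if transfer (c1:Int) (c2:Int) h = col then
            (((List.range (1 <<< (h+1))).map (fun (k : Nat) => f (k:Int))).getD c1 0)
          else 0)
          = (fun (c1 : Nat) => if transfer (c1:Int) (c2:Int) h = col then f (c1:Int) else 0) c1 := by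
        intro c1 hc1
        rw [PySem.List.getD_map_range _ _ _ _ (List.mem_range.mp hc1)]
      rw [List.map_congr_left hinner]
      show _ = pvStepF h col f (c2:Int)
      unfold pvStepF
      rw [pvRng_eq, List.map_map]
      rfl
    rw [hstep, ih]
    rfl

lemma pvMain (h : Nat) (cols : List Int) :
    ((cols.foldl (fun st col =>
        st.keys.foldl (fun nxt c1 =>
          ((((PySem.List.pyRange 0 ((1:Int) <<< (h+1)) 1).foldl (fun m a =>
              (PySem.List.pyRange 0 ((1:Int) <<< (h+1)) 1).foldl (fun m b =>
                let res := transfer a b h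
                if PySem.Set.contains (PySem.Set.ofList cols) res then
                  m.modify (res, a) PySem.Set.empty (fun s => PySem.Set.add s b)
                else m) m) PySem.Dict.empty).getD (col, c1) PySem.Set.empty).foldl
            (fun nxt c2 => nxt.modify c2 0 (fun x => x + st.getD c1 0)) nxt))
          PySem.Dict.empty)
      ((PySem.List.pyRange 0 ((1:Int) <<< (h+1)) 1).foldl (fun d i => d.insert i 1)
        PySem.Dict.empty : PySem.Dict Int Int)).values).sum
    = (cols.foldl (fun (state : List Int) (col : Int) =>
        (List.range (1 <<< (h+1))).map (fun (c2 : Nat) =>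
          ((List.range (1 <<< (h+1))).map (fun (c1 : Nat) =>
            if transfer (c1:Int) (c2:Int) h = col then state.getD c1 0 else 0)).sum))
        (List.replicate (1 <<< (h+1)) 1)).sum := by
  show ((cols.foldl
      (pvADP ((pvRng h).foldl (fun m a =>
        (pvRng h).foldl (pvMStep h (PySem.Set.ofList cols) a) m) PySem.Dict.empty))
      ((pvRng h).foldl (fun d i => d.insert i 1) PySem.Dict.empty)).values).sum = _
  have hmp : ∀ col ∈ cols, ∀ a ∈ pvRng h,
      (((pvRng h).foldl (fun m a =>
        (pvRng h).foldl (pvMStep h (PySem.Set.ofList cols) a) m)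
        PySem.Dict.empty).getD (col, a) PySem.Set.empty) = pvS h col a := by
    intro col hcol a ha
    exact pvMapping h (PySem.Set.ofList cols) a col ha
      (by simp [PySem.Set.contains]; exact hcol)
  obtain ⟨hndF, hsubF, hvalF⟩ := pvAFold h _ cols
    ((pvRng h).foldl (fun d i => d.insert i 1) PySem.Dict.empty) (fun _ => 1) hmp
    (by rw [pvInit_keys]; exact pvRng_nodup h)
    (by intro k hk; rw [pvInit_keys] at hk; exact hk)
    (pvInit_getD h)
  rw [PySem.Dict.values_eq_map_keys _ hndF 0]
  rw [pvSumExt _ (pvRng h) _ hndF (pvRng_nodup h) hsubF ?hz]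
  case hz =>
    intro c _ hnk
    exact PySem.Dict.getD_of_not_contains _ _ (by
      rw [Bool.eq_false_iff]
      intro hcon
      exact hnk ((PySem.Dict.contains_iff_mem_keys _ _).mp hcon))
  have hcong : ∀ k ∈ pvRng h,
      ((cols.foldl
        (pvADP ((pvRng h).foldl (fun m a =>
          (pvRng h).foldl (pvMStep h (PySem.Set.ofList cols) a) m) PySem.Dict.empty))
        ((pvRng h).foldl (fun d i => d.insert i 1) PySem.Dict.empty)).getD k 0)
      = pvIter h cols (fun _ => 1) k := by
    intro k hk
    rw [hvalF k, if_pos hk]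
  rw [List.map_congr_left hcong]
  have hrep : (List.replicate (1 <<< (h+1)) (1:Int))
      = (List.range (1 <<< (h+1))).map (fun (k : Nat) => (fun (_ : Int) => (1:Int)) (k:Int)) := by
    rw [List.map_const', List.length_range]
  rw [hrep, pvBFold h cols (fun _ => 1)]
  rw [pvRng_eq, List.map_map]
  rfl

-- ===== VERDICT (by name: the statement is the Claim_ definition above) =====
theorem solution_spec : Claim_equal_solution := by
  intro g _hdom hpre
  unfold Spec_solution
  cases g with
  | nil => rfl
  | cons g0 gs =>
    simp only [solution, solution_alt]
    rw [if_neg (by simp)]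
    rw [PySem.List.pyGetD_zero_cons]
    exact pvMain (g0 :: gs).length _
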